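-- pv_equiv track=rewrite | github.com/rlemke/agentflow | examples/event-driven-etl/handlers/shared/etl_utils.py | transform_records
-- ===== SOURCE A (Python) =====
-- def transform_records(
--     records: list[dict],
--     filter_expr: str = "true",
--     rename_map: dict | None = None,
--     deduplicate: bool = False,
-- ) -> tuple[list[dict], int, int]:
--     """Transform records with optional filter, rename, and dedup.
--
--     Returns (transformed, transform_count, dropped_count).
--     """
--     rename_map = rename_map or {}
--     result = []
--     seen_ids: set[str] = set()
--     dropped = 0
--
--     for rec in records:
--         # Simple filter: skip records with empty id
--         if filter_expr != "true" and not rec.get("id"):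
--             dropped += 1
--             continue
--
--         # Deduplicate by id
--         if deduplicate:
--             rec_id = rec.get("id", "")
--             if rec_id in seen_ids:
--                 dropped += 1
--                 continue
--             seen_ids.add(rec_id)
--
--         # Apply rename map
--         transformed = {}
--         for k, v in rec.items():
--             new_key = rename_map.get(k, k)
--             transformed[new_key] = v
--         result.append(transformed)
--
--     return result, len(result), dropped
-- ===== SOURCE B (Python) =====
-- def transform_records(
--     records: list[dict],
--     filter_expr: str = "true",
--     rename_map: dict | None = None,
--     deduplicate: bool = False,
-- ) -> tuple[list[dict], int, int]:
--     """Staged pipeline: filter, then dedup via a first-occurrence dict, then rename."""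
--     rm = rename_map or {}
--
--     # Stage 1: filter (only active when filter_expr != "true")
--     if filter_expr == "true":
--         kept = list(records)
--         dropped_filter = 0
--     else:
--         kept = [r for r in records if r.get("id")]
--         dropped_filter = len(records) - len(kept)
--
--     # Stage 2: dedup by id, keeping the first occurrence, via an insertion-ordered dict
--     if deduplicate:
--         by_id = {}
--         for r in kept:
--             by_id.setdefault(r.get("id", ""), r)
--         unique = list(by_id.values())
--         dropped_dedup = len(kept) - len(unique)
--     else:
--         unique = kept
--         dropped_dedup = 0
--
--     # Stage 3: rename keys
--     out = [{rm.get(k, k): v for k, v in r.items()} for r in unique]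
--     return out, len(out), dropped_filter + dropped_dedup
-- ===== Notes on version B (the rewrite author's own statement) =====
-- stated objective: alternative
-- what changed: Replaces A's single fused loop carrying (result, seen-set, dropped counter) with three sequential stages: a filter comprehension, a first-occurrence dict (setdefault) whose values are the deduped records with drop counts recovered from length differences, and a final rename map.
import Mathlib
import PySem

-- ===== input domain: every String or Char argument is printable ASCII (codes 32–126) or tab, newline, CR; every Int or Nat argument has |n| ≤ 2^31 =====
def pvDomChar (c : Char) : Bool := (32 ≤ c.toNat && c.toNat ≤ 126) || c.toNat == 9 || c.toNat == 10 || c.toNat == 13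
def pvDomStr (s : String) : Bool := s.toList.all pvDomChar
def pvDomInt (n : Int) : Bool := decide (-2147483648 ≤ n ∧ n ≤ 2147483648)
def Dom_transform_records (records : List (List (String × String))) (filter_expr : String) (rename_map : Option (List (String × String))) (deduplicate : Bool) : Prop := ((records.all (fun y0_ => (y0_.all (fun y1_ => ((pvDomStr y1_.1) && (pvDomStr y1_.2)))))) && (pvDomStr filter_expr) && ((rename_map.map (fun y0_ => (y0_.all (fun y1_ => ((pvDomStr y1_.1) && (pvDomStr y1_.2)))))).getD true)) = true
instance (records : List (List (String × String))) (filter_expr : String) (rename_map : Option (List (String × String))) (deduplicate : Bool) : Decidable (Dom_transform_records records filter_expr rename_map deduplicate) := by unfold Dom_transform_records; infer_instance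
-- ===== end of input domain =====

-- B replaces A's fused loop with three sequential stages (filter, first-occurrence dict dedup, rename); alternative decomposition, same cost.

-- shared helpers (both Pythons perform these identical sub-computations)
-- rec.get("id") truthiness: missing key or empty string is falsy
def pyIdTruthy (rec : List (String × String)) : Bool :=
  match (PySem.Dict.mk rec).get? "id" with
  | some v => v != ""
  | none => false

-- rec.get("id", "")
def pyRid (rec : List (String × String)) : String :=
  (PySem.Dict.mk rec).getD "id" ""

-- {rename_map.get(k, k): v for k, v in rec.items()} (dict built by insertion, overwrite in place)
def pyRenameRec (rm : PySem.Dict String String) (rec : List (String × String)) : List (String × String) :=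
  (rec.foldl (fun t kv => t.insert (rm.getD kv.1 kv.1) kv.2) PySem.Dict.empty).items

-- ===== PORT A =====
def transform_records (records : List (List (String × String))) (filter_expr : String) (rename_map : Option (List (String × String))) (deduplicate : Bool) : (List (List (String × String))) × Int × Int :=
  let rm : PySem.Dict String String := PySem.Dict.mk (rename_map.getD [])
  let st :=
    records.foldl
      (fun (st : List (List (String × String)) × PySem.Set String × Int) rec =>
        if filter_expr != "true" && !(pyIdTruthy rec) then
          (st.1, st.2.1, st.2.2 + 1)
        else if deduplicate then
          let rid := pyRid rec
          if PySem.Set.contains st.2.1 rid then (st.1, st.2.1, st.2.2 + 1)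
          else (st.1 ++ [pyRenameRec rm rec], PySem.Set.add st.2.1 rid, st.2.2)
        else
          (st.1 ++ [pyRenameRec rm rec], st.2.1, st.2.2))
      ([], PySem.Set.empty, 0)
  (st.1, (st.1.length : Int), st.2.2)

-- ===== PORT B =====
def transform_records_alt (records : List (List (String × String))) (filter_expr : String) (rename_map : Option (List (String × String))) (deduplicate : Bool) : (List (List (String × String))) × Int × Int :=
  let rm : PySem.Dict String String := PySem.Dict.mk (rename_map.getD [])
  -- Stage 1: filter
  let stage1 : List (List (String × String)) × Int :=
    if filter_expr == "true" then (records, 0)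
    else
      let kept := records.filter pyIdTruthy
      (kept, (records.length : Int) - (kept.length : Int))
  let kept := stage1.1
  -- Stage 2: dedup via first-occurrence dict
  let stage2 : List (List (String × String)) × Int :=
    if deduplicate then
      let byId : PySem.Dict String (List (String × String)) :=
        kept.foldl (fun d r => d.setdefault (pyRid r) r) PySem.Dict.empty
      let unique := byId.values
      (unique, (kept.length : Int) - (unique.length : Int))
    else (kept, 0)
  -- Stage 3: rename
  let out := stage2.1.map (pyRenameRec rm)
  (out, (out.length : Int), stage1.2 + stage2.2)

-- ===== PRECONDITION & SPEC =====
def Spec_transform_records (records : List (List (String × String))) (filter_expr : String) (rename_map : Option (List (String × String))) (deduplicate : Bool) (out : (List (List (String × String))) × Int × Int) : Prop := out = transform_records_alt records filter_expr rename_map deduplicate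
instance (records : List (List (String × String))) (filter_expr : String) (rename_map : Option (List (String × String))) (deduplicate : Bool) (out : (List (List (String × String))) × Int × Int) : Decidable (Spec_transform_records records filter_expr rename_map deduplicate out) := by unfold Spec_transform_records; infer_instance

-- ===== CLAIM (what is proved, stated in full; the proofs are below) =====
def Claim_equal_transform_records : Prop := ∀ (records : List (List (String × String))) (filter_expr : String) (rename_map : Option (List (String × String))) (deduplicate : Bool), Dom_transform_records records filter_expr rename_map deduplicate → Spec_transform_records records filter_expr rename_map deduplicate (transform_records records filter_expr rename_map deduplicate)

-- ===== LEMMAS AND PROOFS =====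

-- reference recursion: filter+dedup stages combined, returning (kept raw records, dropped count)
def fgo (F dd : Bool) : List (List (String × String)) → PySem.Set String → List (List (String × String)) × Int
  | [], _ => ([], 0)
  | r :: rs, seen =>
    if F && !(pyIdTruthy r) then
      let p := fgo F dd rs seen; (p.1, p.2 + 1)
    else if dd then
      if PySem.Set.contains seen (pyRid r) then
        let p := fgo F dd rs seen; (p.1, p.2 + 1)
      else
        let p := fgo F dd rs (PySem.Set.add seen (pyRid r)); (r :: p.1, p.2)
    else
      let p := fgo F dd rs seen; (r :: p.1, p.2)

-- dedup-only recursion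
def dgo (dd : Bool) : List (List (String × String)) → PySem.Set String → List (List (String × String)) × Int
  | [], _ => ([], 0)
  | r :: rs, seen =>
    if dd then
      if PySem.Set.contains seen (pyRid r) then
        let p := dgo dd rs seen; (p.1, p.2 + 1)
      else
        let p := dgo dd rs (PySem.Set.add seen (pyRid r)); (r :: p.1, p.2)
    else
      let p := dgo dd rs seen; (r :: p.1, p.2)

theorem dgo_false (rs : List (List (String × String))) (seen : PySem.Set String) :
    dgo false rs seen = (rs, 0) := by
  induction rs generalizing seen with
  | nil => rfl
  | cons r rs ih => simp [dgo, ih]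

theorem dgo_len (dd : Bool) (rs : List (List (String × String))) (seen : PySem.Set String) :
    ((dgo dd rs seen).1.length : Int) + (dgo dd rs seen).2 = (rs.length : Int) := by
  induction rs generalizing seen with
  | nil => simp [dgo]
  | cons r rs ih =>
      simp only [dgo]
      split
      · split
        · have := ih seen; simp; push_cast at this ⊢; omega
        · have := ih (PySem.Set.add seen (pyRid r)); simp; push_cast at this ⊢; omega
      · have := ih seen; simp; push_cast at this ⊢; omega

-- A's fused loop, generalized over its accumulator, computes fgo
theorem A_fold (rm : PySem.Dict String String) (F dd : Bool)
    (rs : List (List (String × String))) (seen : PySem.Set String)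
    (res : List (List (String × String))) (dropped : Int) :
    (rs.foldl
      (fun (st : List (List (String × String)) × PySem.Set String × Int) rec =>
        if F && !(pyIdTruthy rec) then
          (st.1, st.2.1, st.2.2 + 1)
        else if dd then
          let rid := pyRid rec
          if PySem.Set.contains st.2.1 rid then (st.1, st.2.1, st.2.2 + 1)
          else (st.1 ++ [pyRenameRec rm rec], PySem.Set.add st.2.1 rid, st.2.2)
        else
          (st.1 ++ [pyRenameRec rm rec], st.2.1, st.2.2))
      (res, seen, dropped)).1 = res ++ (fgo F dd rs seen).1.map (pyRenameRec rm)
    ∧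
    (rs.foldl
      (fun (st : List (List (String × String)) × PySem.Set String × Int) rec =>
        if F && !(pyIdTruthy rec) then
          (st.1, st.2.1, st.2.2 + 1)
        else if dd then
          let rid := pyRid rec
          if PySem.Set.contains st.2.1 rid then (st.1, st.2.1, st.2.2 + 1)
          else (st.1 ++ [pyRenameRec rm rec], PySem.Set.add st.2.1 rid, st.2.2)
        else
          (st.1 ++ [pyRenameRec rm rec], st.2.1, st.2.2))
      (res, seen, dropped)).2.2 = dropped + (fgo F dd rs seen).2 := by
  induction rs generalizing seen res dropped with
  | nil => simp [fgo]
  | cons r rs ih =>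
      simp only [List.foldl_cons, fgo]
      by_cases h1 : (F && !(pyIdTruthy r)) = true
      · rw [if_pos h1, if_pos h1]
        have := ih seen res (dropped + 1)
        refine ⟨by rw [this.1], by rw [this.2]; omega⟩
      · rw [if_neg h1, if_neg h1]
        by_cases h2 : dd = true
        · rw [if_pos h2, if_pos h2]
          by_cases h3 : PySem.Set.contains seen (pyRid r) = true
          · rw [if_pos h3, if_pos h3]
            have := ih seen res (dropped + 1)
            refine ⟨by rw [this.1], by rw [this.2]; omega⟩
          · rw [if_neg h3, if_neg h3]
            have := ih (PySem.Set.add seen (pyRid r)) (res ++ [pyRenameRec rm r]) dropped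
            refine ⟨by rw [this.1]; simp, by rw [this.2]⟩
        · rw [if_neg h2, if_neg h2]
          have := ih seen (res ++ [pyRenameRec rm r]) dropped
          refine ⟨by rw [this.1]; simp, by rw [this.2]⟩

-- fgo with the filter inactive is exactly dgo
theorem fgo_false (dd : Bool) (rs : List (List (String × String))) (seen : PySem.Set String) :
    fgo false dd rs seen = dgo dd rs seen := by
  induction rs generalizing seen with
  | nil => rfl
  | cons r rs ih =>
      simp only [fgo, dgo, Bool.false_and, Bool.false_eq_true, if_false]
      by_cases h2 : dd = true
      · rw [if_pos h2, if_pos h2]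
        by_cases h3 : PySem.Set.contains seen (pyRid r) = true
        · rw [if_pos h3, if_pos h3, ih]
        · rw [if_neg h3, if_neg h3, ih]
      · rw [if_neg h2, if_neg h2, ih]

-- fgo with the filter active factors through List.filter followed by dgo
theorem fgo_true (dd : Bool) (rs : List (List (String × String))) (seen : PySem.Set String) :
    fgo true dd rs seen =
      ((dgo dd (rs.filter pyIdTruthy) seen).1,
       ((rs.length : Int) - ((rs.filter pyIdTruthy).length : Int))
         + (dgo dd (rs.filter pyIdTruthy) seen).2) := by
  induction rs generalizing seen with
  | nil => simp [fgo, dgo]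
  | cons r rs ih =>
      by_cases ht : pyIdTruthy r = true
      · have hcond : (true && !(pyIdTruthy r)) = false := by simp [ht]
        simp only [fgo, hcond, Bool.false_eq_true, if_false,
          List.filter_cons_of_pos ht, dgo]
        by_cases h2 : dd = true
        · rw [if_pos h2, if_pos h2]
          by_cases h3 : PySem.Set.contains seen (pyRid r) = true
          · rw [if_pos h3, if_pos h3, ih seen]
            refine Prod.ext rfl ?_
            simp only [List.length_cons]
            push_cast
            omega
          · rw [if_neg h3, if_neg h3, ih (PySem.Set.add seen (pyRid r))]
            refine Prod.ext rfl ?_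
            simp only [List.length_cons]
            push_cast
            omega
        · rw [if_neg h2, if_neg h2, ih seen]
          refine Prod.ext rfl ?_
          simp only [List.length_cons]
          push_cast
          omega
      · have hcond : (true && !(pyIdTruthy r)) = true := by simp [ht]
        have hf : List.filter pyIdTruthy (r :: rs) = List.filter pyIdTruthy rs := by
          simp [ht]
        simp only [fgo, hcond, if_true, hf]
        rw [ih seen]
        refine Prod.ext rfl ?_
        simp only [List.length_cons]
        push_cast
        omega

-- B's setdefault loop: values accumulate exactly dgo's kept records, keys track the seen set
theorem setdefault_fold (rs : List (List (String × String)))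
    (d : PySem.Dict String (List (String × String))) :
    (rs.foldl (fun d r => d.setdefault (pyRid r) r) d).values
      = d.values ++ (dgo true rs d.keys).1 := by
  induction rs generalizing d with
  | nil => simp [dgo]
  | cons r rs ih =>
      by_cases hc : d.contains (pyRid r) = true
      · have hm : pyRid r ∈ d.keys := (PySem.Dict.contains_iff_mem_keys d (pyRid r)).1 hc
        rw [List.foldl_cons]
        have hsd : d.setdefault (pyRid r) r = d := by
          rw [PySem.Dict.setdefault, if_pos hc]
        rw [hsd, ih d]
        have hstep : dgo true (r :: rs) d.keys
            = ((dgo true rs d.keys).1, (dgo true rs d.keys).2 + 1) := by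
          simp [dgo, PySem.Set.contains, List.contains_eq_mem, hm]
        rw [hstep]
      · have hm : pyRid r ∉ d.keys := fun h => hc ((PySem.Dict.contains_iff_mem_keys d (pyRid r)).2 h)
        rw [List.foldl_cons]
        have hsd : d.setdefault (pyRid r) r = PySem.Dict.mk (d.items ++ [(pyRid r, r)]) := by
          rw [PySem.Dict.setdefault, if_neg hc]
        rw [hsd, ih]
        have hkeys : (PySem.Dict.mk (d.items ++ [(pyRid r, r)])).keys
            = d.keys ++ [pyRid r] := by
          simp [PySem.Dict.keys]
        have hvals : (PySem.Dict.mk (d.items ++ [(pyRid r, r)])).values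
            = d.values ++ [r] := by
          simp [PySem.Dict.values]
        rw [hkeys, hvals]
        have hstep : dgo true (r :: rs) d.keys
            = (r :: (dgo true rs (d.keys ++ [pyRid r])).1,
               (dgo true rs (d.keys ++ [pyRid r])).2) := by
          simp [dgo, PySem.Set.contains, List.contains_eq_mem, hm]
        rw [hstep]
        simp

-- ===== VERDICT (by name: the statement is the Claim_ definition above) =====
theorem transform_records_spec : Claim_equal_transform_records := by
  intro records filter_expr rename_map deduplicate _hdom
  unfold Spec_transform_records transform_records transform_records_alt
  have hA := A_fold (PySem.Dict.mk (rename_map.getD [])) (filter_expr != "true")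
      deduplicate records PySem.Set.empty [] 0
  simp only [List.nil_append, zero_add] at hA
  simp only [hA.1, hA.2]
  have hkeys_empty : (PySem.Dict.empty : PySem.Dict String (List (String × String))).keys
      = PySem.Set.empty := rfl
  by_cases he : filter_expr = "true"
  · have hF : (filter_expr != "true") = false := by simp [he]
    have hE : (filter_expr == "true") = true := by simp [he]
    simp only [hF, hE, if_true, fgo_false]
    by_cases hd : deduplicate = true
    · subst hd
      have hsd := setdefault_fold records PySem.Dict.empty
      rw [hkeys_empty] at hsd
      have hv : (PySem.Dict.empty : PySem.Dict String (List (String × String))).values = [] := rfl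
      rw [hv, List.nil_append] at hsd
      have hlen := dgo_len true records PySem.Set.empty
      rw [if_pos (by trivial), hsd]
      refine Prod.ext ?_ (Prod.ext ?_ ?_)
      · rfl
      · rfl
      · simp only [PySem.Set.empty] at hlen ⊢
        simp
        omega
    · simp only [Bool.not_eq_true] at hd
      subst hd
      simp only [if_neg (by simp : ¬ (false = true)), dgo_false]
      simp
  · have hF : (filter_expr != "true") = true := by simp [he]
    have hE : (filter_expr == "true") = false := by simp [he]
    simp only [hF, hE, if_neg (by simp : ¬ (false = true)), fgo_true]
    by_cases hd : deduplicate = true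
    · subst hd
      have hsd := setdefault_fold (records.filter pyIdTruthy) PySem.Dict.empty
      rw [hkeys_empty] at hsd
      have hv : (PySem.Dict.empty : PySem.Dict String (List (String × String))).values = [] := rfl
      rw [hv, List.nil_append] at hsd
      have hlen := dgo_len true (records.filter pyIdTruthy) PySem.Set.empty
      rw [if_pos (by trivial), hsd]
      refine Prod.ext ?_ (Prod.ext ?_ ?_)
      · rfl
      · rfl
      · simp only [PySem.Set.empty] at hlen ⊢
        simp
        omega
    · simp only [Bool.not_eq_true] at hd
      subst hd
      simp only [if_neg (by simp : ¬ (false = true)), dgo_false]
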